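-- pv_equiv track=rewrite | github.com/viethuyvu/aoc2024 | day9/day9.py | find_free
-- ===== SOURCE A (Python) =====
-- def find_free(lst):
--     free_list = []
--     count = 0
--     #find the first free space
--     for i in range(len(lst)):
--         if lst[i] == '.':
--             if count == 0:
--                 start = i
--             count +=1
--         else:
--             if count > 0:
--                 end = i
--                 free_list.append([start, end])
--                 count = 0
--     if count > 0:
--         free_list.append([start, len(lst)])
--
--     return free_list
-- ===== SOURCE B (Python) =====
-- from itertools import groupby
--
--
-- def find_free(lst):
--     free_list = []
--     pos = 0
--     for key, group in groupby(lst):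
--         length = sum(1 for _ in group)
--         if key == '.':
--             free_list.append([pos, pos + length])
--         pos += length
--     return free_list
-- ===== Notes on version B (the rewrite author's own statement) =====
-- stated objective: idiomatic
-- what changed: Replaces A's index loop with a count/start state machine and trailing flush by itertools.groupby run-length grouping threaded with a running position, emitting [pos, pos+length] for each '.' run.
import Mathlib
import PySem

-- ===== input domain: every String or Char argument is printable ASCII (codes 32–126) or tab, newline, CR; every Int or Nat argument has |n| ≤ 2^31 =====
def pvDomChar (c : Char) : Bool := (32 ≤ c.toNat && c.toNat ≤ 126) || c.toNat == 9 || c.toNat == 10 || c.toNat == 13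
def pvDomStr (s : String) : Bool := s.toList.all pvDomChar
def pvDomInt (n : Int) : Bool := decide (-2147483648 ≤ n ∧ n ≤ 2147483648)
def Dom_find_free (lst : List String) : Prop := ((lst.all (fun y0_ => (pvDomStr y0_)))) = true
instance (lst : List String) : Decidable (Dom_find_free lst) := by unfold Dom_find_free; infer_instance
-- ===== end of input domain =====

-- B replaces A's manual count/start state machine (with trailing flush) by run-length
-- grouping (itertools.groupby) threaded with a running position; objective: idiomatic.


-- ===== PORT A =====
-- one iteration of A's for-loop body; state = (free_list, count, start)
def stepA (full : List String) (st : List (List Int) × Int × Int) (i : Int) :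
    List (List Int) × Int × Int :=
  if PySem.List.pyGetD full i "" = "." then
    (st.1, st.2.1 + 1, if st.2.1 = 0 then i else st.2.2)
  else
    if st.2.1 > 0 then (st.1 ++ [[st.2.2, i]], 0, st.2.2) else st

def find_free (lst : List String) : List (List Int) :=
  let st := (PySem.List.pyRange 0 (lst.length : Int) 1).foldl (stepA lst) ([], 0, 0)
  if st.2.1 > 0 then st.1 ++ [[st.2.2, (lst.length : Int)]] else st.1

-- ===== PORT B =====
-- itertools.groupby + per-group length: the maximal runs of equal elements, as (key, run length)
def groupRuns : List String → List (String × Nat)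
  | [] => []
  | x :: xs =>
      (x, 1 + (xs.takeWhile (· == x)).length) :: groupRuns (xs.dropWhile (· == x))
  termination_by xs => xs.length
  decreasing_by
    exact Nat.lt_succ_of_le (List.length_dropWhile_le _ _)

def find_free_alt (lst : List String) : List (List Int) :=
  ((groupRuns lst).foldl
    (fun (st : List (List Int) × Int) g =>
      ((if g.1 = "." then st.1 ++ [[st.2, st.2 + (g.2 : Int)]] else st.1),
       st.2 + (g.2 : Int)))
    ([], 0)).1

-- ===== PRECONDITION & SPEC =====
def Spec_find_free (lst : List String) (out : List (List Int)) : Prop := out = find_free_alt lst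
instance (lst : List String) (out : List (List Int)) : Decidable (Spec_find_free lst out) := by unfold Spec_find_free; infer_instance

-- ===== CLAIM (what is proved, stated in full; the proofs are below) =====
def Claim_equal_find_free : Prop := ∀ (lst : List String), Dom_find_free lst → Spec_find_free lst (find_free lst)

-- ===== LEMMAS AND PROOFS =====

-- structural rendering of A's loop (index threaded explicitly)
def loopA : List String → Int → List (List Int) × Int × Int → List (List Int) × Int × Int
  | [], _, st => st
  | x :: xs, i, (acc, c, s) =>
      if x = "." then loopA xs (i + 1) (acc, c + 1, if c = 0 then i else s)
      else if c > 0 then loopA xs (i + 1) (acc ++ [[s, i]], 0, s)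
      else loopA xs (i + 1) (acc, c, s)

-- A's result = loop then trailing flush at end marker i + |xs|
def outA (xs : List String) (i : Int) (st : List (List Int) × Int × Int) : List (List Int) :=
  match loopA xs i st with
  | (acc, c, s) => if c > 0 then acc ++ [[s, i + (xs.length : Int)]] else acc

-- B's accumulation, recursively
def goB : List (String × Nat) → Int → List (List Int)
  | [], _ => []
  | (k, n) :: gs, p => (if k = "." then [[p, p + (n : Int)]] else []) ++ goB gs (p + (n : Int))

lemma goB_foldl (gs : List (String × Nat)) (acc : List (List Int)) (p : Int) :
    (gs.foldl
      (fun (st : List (List Int) × Int) g =>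
        ((if g.1 = "." then st.1 ++ [[st.2, st.2 + (g.2 : Int)]] else st.1),
         st.2 + (g.2 : Int))) (acc, p)).1 = acc ++ goB gs p := by
  induction gs generalizing acc p with
  | nil => simp [goB]
  | cons g gs ih =>
      obtain ⟨k, n⟩ := g
      by_cases hk : k = "." <;> simp [goB, hk, ih]

lemma getD_append_cons (pre : List String) (x : String) (xs : List String) (d : String) :
    (pre ++ x :: xs).getD pre.length d = x := by
  simp [List.getD_eq_getElem?_getD]

lemma outA_eq (xs : List String) (i : Int) (st : List (List Int) × Int × Int)
    (acc : List (List Int)) (c s : Int) (h : loopA xs i st = (acc, c, s)) :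
    outA xs i st = if c > 0 then acc ++ [[s, i + (xs.length : Int)]] else acc := by
  unfold outA; rw [h]

lemma bridgeA (xs : List String) : ∀ (pre : List String) (st : List (List Int) × Int × Int),
    (PySem.List.pyRange (pre.length : Int) ((pre.length : Int) + (xs.length : Int)) 1).foldl
      (stepA (pre ++ xs)) st = loopA xs (pre.length : Int) st := by
  induction xs with
  | nil => intro pre st; simp [PySem.List.pyRange_one_eq_nil, loopA]
  | cons x xs ih =>
      intro pre st
      have hlt : (pre.length : Int) < (pre.length : Int) + ((x :: xs).length : Int) := by
        push_cast [List.length_cons]; omega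
      rw [PySem.List.pyRange_one_cons hlt]
      simp only [List.foldl_cons]
      have hget : PySem.List.pyGetD (pre ++ x :: xs) (pre.length : Int) "" = x := by
        rw [PySem.List.pyGetD_natCast]; exact getD_append_cons pre x xs ""
      have e3 : (pre.length : Int) + ((x :: xs).length : Int)
          = (((pre ++ [x]).length : Int)) + (xs.length : Int) := by
        push_cast [List.length_cons, List.length_append, List.length_nil]; ring
      have e1 : ((pre ++ [x]).length : Int) = (pre.length : Int) + 1 := by
        push_cast [List.length_append, List.length_cons, List.length_nil]; ring
      have := ih (pre ++ [x]) (stepA (pre ++ x :: xs) st (pre.length : Int))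
      rw [e1, List.append_assoc, List.singleton_append] at this
      rw [e3, e1, this]
      obtain ⟨acc, c, s⟩ := st
      simp only [stepA, hget, loopA]
      split_ifs <;> rfl

lemma loopA_append (ys zs : List String) (i : Int) (st : List (List Int) × Int × Int) :
    loopA (ys ++ zs) i st = loopA zs (i + (ys.length : Int)) (loopA ys i st) := by
  induction ys generalizing i st with
  | nil => simp [loopA]
  | cons y ys ih =>
      obtain ⟨acc, c, s⟩ := st
      have e : i + ((y :: ys).length : Int) = (i + 1) + (ys.length : Int) := by
        push_cast [List.length_cons]; ring
      simp only [List.cons_append, loopA]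
      split_ifs <;> rw [ih, e]

lemma loopA_dots (ys : List String) (h : ∀ y ∈ ys, y = ".") : ∀ (i : Int)
    (acc : List (List Int)) (c s : Int), 0 < c →
    loopA ys i (acc, c, s) = (acc, c + (ys.length : Int), s) := by
  induction ys with
  | nil => intro i acc c s _; simp [loopA]
  | cons y ys ih =>
      intro i acc c s hc
      have hy : y = "." := h y (by simp)
      subst hy
      have hne : ¬ c = 0 := by omega
      have step : loopA ("." :: ys) i (acc, c, s) = loopA ys (i + 1) (acc, c + 1, s) := by
        simp [loopA, hne]
      rw [step, ih (fun z hz => h z (List.mem_cons_of_mem _ hz)) (i + 1) acc (c + 1) s (by omega)]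
      exact congrArg (fun z => (acc, z, s)) (by push_cast [List.length_cons]; ring)

lemma dropWhile_head_false (p : String → Bool) :
    ∀ (l : List String) (y : String) (r : List String), l.dropWhile p = y :: r → p y = false := by
  intro l
  induction l with
  | nil => intro y r h; simp at h
  | cons a l ih =>
      intro y r h
      by_cases hp : p a
      · rw [List.dropWhile_cons_of_pos hp] at h; exact ih _ _ h
      · rw [List.dropWhile_cons_of_neg hp] at h
        cases h; simpa using hp

lemma goB_skip (y : String) (hy : ¬ y = ".") (zs : List String) (p : Int) :
    goB (groupRuns (y :: zs)) p = goB (groupRuns zs) (p + 1) := by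
  cases zs with
  | nil => simp [groupRuns, goB, hy]
  | cons z zs =>
      by_cases hzy : z = y
      · subst hzy
        have hg1 : groupRuns (z :: z :: zs)
            = (z, 1 + (1 + (zs.takeWhile (· == z)).length)) :: groupRuns (zs.dropWhile (· == z)) := by
          simp [groupRuns]; omega
        have hg2 : groupRuns (z :: zs)
            = (z, 1 + (zs.takeWhile (· == z)).length) :: groupRuns (zs.dropWhile (· == z)) := by
          simp [groupRuns]
        rw [hg1, hg2]
        simp only [goB, if_neg hy, List.nil_append]
        congr 1
        push_cast; ring
      · have hzy' : (z == y) = false := by simp [hzy]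
        have hg : groupRuns (y :: z :: zs) = (y, 1) :: groupRuns (z :: zs) := by
          simp [groupRuns, hzy']
        rw [hg]
        simp [goB, hy]

lemma main_loop : ∀ (n : Nat) (xs : List String), xs.length ≤ n → ∀ (i : Int)
    (acc : List (List Int)) (s : Int),
    outA xs i (acc, 0, s) = acc ++ goB (groupRuns xs) i := by
  intro n
  induction n with
  | zero =>
      intro xs hx i acc s
      have hnil : xs = [] := List.eq_nil_of_length_eq_zero (Nat.le_zero.mp hx)
      subst hnil; simp [outA, loopA, groupRuns, goB]
  | succ n ih =>
      intro xs hx i acc s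
      cases xs with
      | nil => simp [outA, loopA, groupRuns, goB]
      | cons x rest =>
          by_cases hx' : x = "."
          · subst hx'
            have htmem : ∀ y ∈ rest.takeWhile (· == "."), y = "." := by
              intro y hyt
              simpa using List.mem_takeWhile_imp hyt
            have hrest : rest.takeWhile (· == ".") ++ rest.dropWhile (· == ".") = rest :=
              List.takeWhile_append_dropWhile
            have hg : groupRuns ("." :: rest)
                = (".", 1 + (rest.takeWhile (· == ".")).length) :: groupRuns (rest.dropWhile (· == ".")) := by
              simp [groupRuns]
            have step1 : loopA ("." :: rest) i (acc, 0, s) = loopA rest (i + 1) (acc, 1, i) := by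
              simp [loopA]
            have step2 : loopA rest (i + 1) (acc, 1, i)
                = loopA (rest.dropWhile (· == ".")) (i + 1 + ((rest.takeWhile (· == ".")).length : Int))
                    (acc, 1 + ((rest.takeWhile (· == ".")).length : Int), i) := by
              conv_lhs => rw [← hrest]
              rw [loopA_append, loopA_dots _ htmem _ _ _ _ one_pos]
            cases hrc : rest.dropWhile (· == ".") with
            | nil =>
                have hlen : rest.length = (rest.takeWhile (· == ".")).length := by
                  conv_lhs => rw [← hrest]
                  rw [hrc]; simp
                have hL : loopA ("." :: rest) i (acc, 0, s)
                    = (acc, 1 + ((rest.takeWhile (· == ".")).length : Int), i) := by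
                  rw [step1, step2, hrc]; rfl
                rw [outA_eq _ _ _ _ _ _ hL, if_pos (by omega : (1 : Int) + ((rest.takeWhile (· == ".")).length : Int) > 0)]
                rw [hg, hrc]
                simp only [groupRuns, goB, List.append_nil]
                have e : i + ((("." :: rest)).length : Int)
                    = i + ((1 + (rest.takeWhile (· == ".")).length : Nat) : Int) := by
                  simp only [List.length_cons, hlen]; push_cast; ring
                rw [e]
                simp
            | cons y r' =>
                have hyne : ¬ y = "." := by
                  simpa using dropWhile_head_false (· == ".") rest y r' hrc
                have hpos : ((1 : Int) + ((rest.takeWhile (· == ".")).length : Int)) > 0 := by omega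
                have step3 : loopA (y :: r') (i + 1 + ((rest.takeWhile (· == ".")).length : Int))
                      (acc, 1 + ((rest.takeWhile (· == ".")).length : Int), i)
                    = loopA r' (i + 1 + ((rest.takeWhile (· == ".")).length : Int) + 1)
                      (acc ++ [[i, i + 1 + ((rest.takeWhile (· == ".")).length : Int)]], 0, i) := by
                  rw [show loopA (y :: r') (i + 1 + ((rest.takeWhile (· == ".")).length : Int))
                      (acc, 1 + ((rest.takeWhile (· == ".")).length : Int), i)
                    = if y = "." then loopA r' (i + 1 + ((rest.takeWhile (· == ".")).length : Int) + 1)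
                        (acc, 1 + ((rest.takeWhile (· == ".")).length : Int) + 1,
                         if 1 + ((rest.takeWhile (· == ".")).length : Int) = 0
                         then i + 1 + ((rest.takeWhile (· == ".")).length : Int) else i)
                      else if 1 + ((rest.takeWhile (· == ".")).length : Int) > 0
                      then loopA r' (i + 1 + ((rest.takeWhile (· == ".")).length : Int) + 1)
                        (acc ++ [[i, i + 1 + ((rest.takeWhile (· == ".")).length : Int)]], 0, i)
                      else loopA r' (i + 1 + ((rest.takeWhile (· == ".")).length : Int) + 1)
                        (acc, 1 + ((rest.takeWhile (· == ".")).length : Int), i) from rfl]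
                  rw [if_neg hyne, if_pos hpos]
                have hlen : rest.length = (rest.takeWhile (· == ".")).length + r'.length + 1 := by
                  conv_lhs => rw [← hrest]
                  rw [hrc]; simp [List.length_append]; omega
                have hL : loopA ("." :: rest) i (acc, 0, s)
                    = loopA r' (i + 1 + ((rest.takeWhile (· == ".")).length : Int) + 1)
                      (acc ++ [[i, i + 1 + ((rest.takeWhile (· == ".")).length : Int)]], 0, i) := by
                  rw [step1, step2, hrc, step3]
                have hM : i + ((("." :: rest)).length : Int)
                    = (i + 1 + ((rest.takeWhile (· == ".")).length : Int) + 1) + (r'.length : Int) := by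
                  simp only [List.length_cons, hlen]; push_cast; ring
                have hout : outA ("." :: rest) i (acc, 0, s)
                    = outA r' (i + 1 + ((rest.takeWhile (· == ".")).length : Int) + 1)
                        (acc ++ [[i, i + 1 + ((rest.takeWhile (· == ".")).length : Int)]], 0, i) := by
                  unfold outA
                  rw [hL, hM]
                rw [hout, ih r' (by omega) _ _ _]
                rw [hg, hrc]
                simp only [goB]
                rw [goB_skip y hyne]
                have e : i + ((1 + (rest.takeWhile (· == ".")).length : Nat) : Int)
                    = i + 1 + ((rest.takeWhile (· == ".")).length : Int) := by
                  push_cast; ring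
                rw [e, List.append_assoc, List.singleton_append]
                rfl
          · have step1 : loopA (x :: rest) i (acc, 0, s) = loopA rest (i + 1) (acc, 0, s) := by
              simp [loopA, hx']
            have hM : i + (((x :: rest)).length : Int) = (i + 1) + (rest.length : Int) := by
              push_cast [List.length_cons]; ring
            have hout : outA (x :: rest) i (acc, 0, s) = outA rest (i + 1) (acc, 0, s) := by
              unfold outA
              rw [step1, hM]
            have hrl : rest.length ≤ n := by
              simp only [List.length_cons] at hx; omega
            rw [hout, ih rest hrl (i + 1) acc s, ← goB_skip x hx']

-- ===== VERDICT (by name: the statement is the Claim_ definition above) =====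
theorem find_free_spec : Claim_equal_find_free := by
  intro lst _
  show find_free lst = find_free_alt lst
  have hb := bridgeA lst [] ([], 0, 0)
  simp only [List.length_nil, Nat.cast_zero, List.nil_append, zero_add] at hb
  have hA : find_free lst = outA lst 0 ([], 0, 0) := by
    rcases hL : loopA lst 0 ([], 0, 0) with ⟨a, c, s⟩
    simp [find_free, outA, hb, hL]
  have hB : find_free_alt lst = [] ++ goB (groupRuns lst) 0 := by
    simp only [find_free_alt]; rw [goB_foldl]
  rw [hA, main_loop lst.length lst (le_refl _) 0 [] 0, hB]
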